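-- pv_equiv track=rewrite | github.com/Ferrari25/ParserASDPpy | Automatas.py | automata_opsuma
-- ===== SOURCE A (Python) =====
-- ESTADO_FINAL = "ESTADO FINAL"
--
-- ESTADO_NO_FINAL = "NO ACEPTADO"
--
-- ESTADO_TRAMPA = "EN ESTADO TRAMPA"
--
-- def automata_opsuma(lexema):
--         estadoactual=0
--         estadosfinales=[1]
--         for vcarac in lexema:
--             if estadoactual==0 and (vcarac=='+' or vcarac=='-'):
--                 estadoactual=1
--             else:
--                 estadoactual=-1
--                 break
--         if estadoactual==-1:
--             return ESTADO_TRAMPA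
--         if estadoactual in estadosfinales:
--              return ESTADO_FINAL
--         else:
--              return ESTADO_NO_FINAL
-- ===== SOURCE B (Python) =====
-- ESTADO_FINAL = "ESTADO FINAL"
-- ESTADO_NO_FINAL = "NO ACEPTADO"
-- ESTADO_TRAMPA = "EN ESTADO TRAMPA"
--
-- def automata_opsuma(lexema):
--     chars = list(lexema)
--     if not chars:
--         return ESTADO_NO_FINAL
--     if len(chars) == 1 and chars[0] in ('+', '-'):
--         return ESTADO_FINAL
--     return ESTADO_TRAMPA
-- ===== Notes on version B (the rewrite author's own statement) =====
-- stated objective: simpler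
-- what changed: Replaced the stateful char-by-char loop with break and final-state membership test by a closed-form classification of the materialized character list (empty / single '+'/'-' / anything else).
import Mathlib
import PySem

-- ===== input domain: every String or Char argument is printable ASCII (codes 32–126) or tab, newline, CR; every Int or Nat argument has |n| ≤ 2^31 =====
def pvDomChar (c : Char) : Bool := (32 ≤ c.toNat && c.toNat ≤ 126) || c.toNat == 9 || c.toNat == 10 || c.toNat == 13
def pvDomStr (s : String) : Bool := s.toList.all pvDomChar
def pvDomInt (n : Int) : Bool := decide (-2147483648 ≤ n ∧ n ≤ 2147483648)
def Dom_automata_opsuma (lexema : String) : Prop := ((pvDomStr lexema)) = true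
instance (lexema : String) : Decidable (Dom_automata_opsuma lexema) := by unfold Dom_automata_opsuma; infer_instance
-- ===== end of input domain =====

-- B replaces A's stateful loop with a closed-form classification of the character list (simpler, same cost).

-- ===== PORT A =====
-- the for-loop with break: state 0 → 1 on a first '+'/'-', -1 (and stop) otherwise
def automataOpsumaLoop : List Char → Int → Int
  | [], estadoactual => estadoactual
  | vcarac :: rest, estadoactual =>
      if estadoactual = 0 ∧ (vcarac = '+' ∨ vcarac = '-') then
        automataOpsumaLoop rest 1
      else
        (-1 : Int)

def automata_opsuma (lexema : String) : String :=
  let estadosfinales : List Int := [1]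
  let estadoactual := automataOpsumaLoop lexema.toList 0
  if estadoactual = -1 then "EN ESTADO TRAMPA"
  else if estadoactual ∈ estadosfinales then "ESTADO FINAL"
  else "NO ACEPTADO"

-- ===== PORT B =====
def automata_opsuma_alt (lexema : String) : String :=
  match lexema.toList with
  | [] => "NO ACEPTADO"
  | [c] => if c = '+' ∨ c = '-' then "ESTADO FINAL" else "EN ESTADO TRAMPA"
  | _ => "EN ESTADO TRAMPA"

-- ===== PRECONDITION & SPEC =====
def Spec_automata_opsuma (lexema : String) (out : String) : Prop := out = automata_opsuma_alt lexema
instance (lexema : String) (out : String) : Decidable (Spec_automata_opsuma lexema out) := by unfold Spec_automata_opsuma; infer_instance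

-- ===== CLAIM (what is proved, stated in full; the proofs are below) =====
def Claim_equal_automata_opsuma : Prop := ∀ (lexema : String), Dom_automata_opsuma lexema → Spec_automata_opsuma lexema (automata_opsuma lexema)

-- ===== LEMMAS AND PROOFS =====
-- ===== VERDICT (by name: the statement is the Claim_ definition above) =====
theorem automata_opsuma_spec : Claim_equal_automata_opsuma := by
  intro lexema _
  unfold Spec_automata_opsuma automata_opsuma automata_opsuma_alt
  match h : lexema.toList with
  | [] => simp [automataOpsumaLoop]
  | [c] =>
      by_cases hc : c = '+' ∨ c = '-' <;>
        simp [automataOpsumaLoop, hc]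
  | c :: d :: rest =>
      by_cases hc : c = '+' ∨ c = '-' <;>
        simp [automataOpsumaLoop, hc]
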